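-- pv_equiv track=rewrite | github.com/mberjans/smo_chatbot_Kiro | src/citation.py | smart_inline_citation_format
-- ===== SOURCE A (Python) =====
-- from typing import List, Set, Dict, Any, Optional, Tuple
--
-- def smart_inline_citation_format(numbers: List[int]):
--     # calculate consecutive ranges
--     # join those with -
--     # join all with ,
--     numbers.sort()
--     ranges = []
--     start = numbers[0]
--     end = numbers[0]
--     for number in numbers[1:]:
--         if number == end + 1:
--             end = number
--         else:
--             if start == end:
--                 ranges.append(str(start))
--             else:
--                 ranges.append(f"{start}-{end}")
--             start = number
--             end = number
--     if start == end:
--         ranges.append(str(start))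
--     else:
--         ranges.append(f"{start}-{end}")
--     cites = ", ".join(ranges)
--     return f"[{cites}]"
-- ===== SOURCE B (Python) =====
-- def smart_inline_citation_format(numbers):
--     numbers.sort()
--     pairs = list(zip(numbers, numbers[1:]))
--     starts = [numbers[0]] + [b for a, b in pairs if b != a + 1]
--     ends = [a for a, b in pairs if b != a + 1] + [numbers[-1]]
--     cites = ", ".join(str(s) if s == e else f"{s}-{e}" for s, e in zip(starts, ends))
--     return f"[{cites}]"
-- ===== Notes on version B (the rewrite author's own statement) =====
-- stated objective: alternative
-- what changed: Replaces the streaming loop with mutable start/end state by staged zip-with-successor passes: run starts and run ends are collected independently from adjacent pairs and then zipped together for formatting.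
import Mathlib
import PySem

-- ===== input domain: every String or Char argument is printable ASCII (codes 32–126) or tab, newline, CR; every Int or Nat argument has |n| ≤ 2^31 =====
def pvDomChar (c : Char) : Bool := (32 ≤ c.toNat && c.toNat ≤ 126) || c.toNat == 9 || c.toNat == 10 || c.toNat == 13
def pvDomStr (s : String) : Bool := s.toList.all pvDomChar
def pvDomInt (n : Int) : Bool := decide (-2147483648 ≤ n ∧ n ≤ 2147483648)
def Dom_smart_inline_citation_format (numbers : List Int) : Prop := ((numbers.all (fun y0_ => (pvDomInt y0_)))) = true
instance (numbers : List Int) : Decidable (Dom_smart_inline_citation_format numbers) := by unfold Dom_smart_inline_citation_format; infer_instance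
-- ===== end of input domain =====

-- B replaces A's single streaming loop with mutable start/end state by staged zip-with-successor
-- passes that collect run starts and run ends independently and pair them up (alternative, same cost).
-- Both Pythons sort `numbers` in place (a caller-visible mutation); the equivalence proved here is
-- about the return value only.

-- ===== PORT A =====
-- format one finished range, as both of A's branches do
def pvFmtA (s e : Int) : String :=
  if s = e then PySem.Int.toStr s else PySem.Int.toStr s ++ "-" ++ PySem.Int.toStr e

-- the body of A's for-loop over numbers[1:], state (ranges, start, end)
def pvStepA (st : List String × Int × Int) (n : Int) : List String × Int × Int :=
  if n = st.2.2 + 1 then (st.1, st.2.1, n)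
  else (st.1 ++ [pvFmtA st.2.1 st.2.2], n, n)

def smart_inline_citation_format (numbers : List Int) : String :=
  let ns := PySem.List.sorted numbers (fun x => x) false
  match ns with
  | [] => ""   -- Python raises IndexError reading numbers[0]; excluded by Pre_
  | h :: t =>
    let st := t.foldl pvStepA ([], h, h)
    "[" ++ PySem.Str.join ", " (st.1 ++ [pvFmtA st.2.1 st.2.2]) ++ "]"

-- ===== PORT B =====
def smart_inline_citation_format_alt (numbers : List Int) : String :=
  let ns := PySem.List.sorted numbers (fun x => x) false
  match ns with
  | [] => ""   -- Python raises IndexError reading numbers[0]; excluded by Pre_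
  | h :: t =>
    -- pairs = list(zip(numbers, numbers[1:]))  (slice [1:] of a nonempty list = drop 1)
    let pairs := (h :: t).zip t
    -- starts = [numbers[0]] + [b for a, b in pairs if b != a + 1]
    let starts := h :: pairs.filterMap (fun p => if p.2 ≠ p.1 + 1 then some p.2 else none)
    -- ends = [a for a, b in pairs if b != a + 1] + [numbers[-1]]
    let ends := pairs.filterMap (fun p => if p.2 ≠ p.1 + 1 then some p.1 else none)
                ++ [(h :: t).getLastD 0]
    let cites := PySem.Str.join ", "
      ((starts.zip ends).map (fun p =>
        if p.1 = p.2 then PySem.Int.toStr p.1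
        else PySem.Int.toStr p.1 ++ "-" ++ PySem.Int.toStr p.2))
    "[" ++ cites ++ "]"

-- ===== PRECONDITION & SPEC =====
-- Pre_ excludes the empty list, on which both Pythons raise IndexError reading numbers[0].
def Pre_smart_inline_citation_format (numbers : List Int) : Prop := numbers ≠ []
instance (numbers : List Int) : Decidable (Pre_smart_inline_citation_format numbers) := by
  unfold Pre_smart_inline_citation_format; infer_instance
def pvWitness_smart_inline_citation_format : List Int := ([3, 1, 2, 7])

def Spec_smart_inline_citation_format (numbers : List Int) (out : String) : Prop := out = smart_inline_citation_format_alt numbers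
instance (numbers : List Int) (out : String) : Decidable (Spec_smart_inline_citation_format numbers out) := by unfold Spec_smart_inline_citation_format; infer_instance

-- ===== CLAIM (what is proved, stated in full; the proofs are below) =====
def Claim_equal_smart_inline_citation_format : Prop := ∀ (numbers : List Int), Dom_smart_inline_citation_format numbers → Pre_smart_inline_citation_format numbers → Spec_smart_inline_citation_format numbers (smart_inline_citation_format numbers)

-- ===== LEMMAS AND PROOFS =====

-- the list of (start, end) runs of the tail t, given current run start s and previous element prev
def pvRuns (s prev : Int) : List Int → List (Int × Int)
  | [] => [(s, prev)]
  | n :: t => if n = prev + 1 then pvRuns s n t else (s, prev) :: pvRuns n n t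

-- A's fold produces exactly the formatted runs
lemma foldA_runs : ∀ (t : List Int) (acc : List String) (s e : Int),
    (let st := t.foldl pvStepA (acc, s, e); st.1 ++ [pvFmtA st.2.1 st.2.2])
      = acc ++ (pvRuns s e t).map (fun p => pvFmtA p.1 p.2) := by
  intro t
  induction t with
  | nil => intro acc s e; simp [pvRuns]
  | cons n t ih =>
    intro acc s e
    by_cases h : n = e + 1 <;>
      simp [pvRuns, pvStepA, h, ih, List.append_assoc]

-- the firsts of the runs are B's `starts`
lemma runs_fst : ∀ (t : List Int) (s prev : Int),
    (pvRuns s prev t).map Prod.fst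
      = s :: ((prev :: t).zip t).filterMap (fun p => if p.2 ≠ p.1 + 1 then some p.2 else none) := by
  intro t
  induction t with
  | nil => intro s prev; simp [pvRuns]
  | cons n t ih =>
    intro s prev
    by_cases h : n = prev + 1 <;> simp [pvRuns, h, ih]

-- the seconds of the runs are B's `ends`
lemma runs_snd : ∀ (t : List Int) (s prev : Int),
    (pvRuns s prev t).map Prod.snd
      = ((prev :: t).zip t).filterMap (fun p => if p.2 ≠ p.1 + 1 then some p.1 else none)
        ++ [(prev :: t).getLastD 0] := by
  intro t
  induction t with
  | nil => intro s prev; simp [pvRuns]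
  | cons n t ih =>
    intro s prev
    by_cases h : n = prev + 1 <;>
      simp [pvRuns, h, ih]

-- ===== VERDICT (by name: the statement is the Claim_ definition above) =====
theorem smart_inline_citation_format_spec : Claim_equal_smart_inline_citation_format := by
  intro numbers _ _
  unfold Spec_smart_inline_citation_format
  unfold smart_inline_citation_format smart_inline_citation_format_alt
  cases hs : PySem.List.sorted numbers (fun x => x) false with
  | nil => rfl
  | cons h t =>
    simp only []
    rw [foldA_runs t [] h h]
    have hz : ((h :: ((h :: t).zip t).filterMap (fun p => if p.2 ≠ p.1 + 1 then some p.2 else none)).zip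
        (((h :: t).zip t).filterMap (fun p => if p.2 ≠ p.1 + 1 then some p.1 else none)
          ++ [(h :: t).getLastD 0]))
        = ((pvRuns h h t).map Prod.fst).zip ((pvRuns h h t).map Prod.snd) := by
      rw [runs_fst, runs_snd]
    simp only [List.nil_append, hz, List.zip_map', pvFmtA]
    simp
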